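-- pv_equiv track=rewrite | github.com/QuentinDuval/PythonExperiments | ml/dl/Sorting.py | reverse_evens
-- ===== SOURCE A (Python) =====
-- def reverse_evens(xs):
--     ys = list(xs)
--     i = 0
--     j = len(ys) - 1
--     while i < j:
--         while i < len(ys) and ys[i] % 2:
--             i += 1
--         while j >= 0 and ys[j] % 2:
--             j -= 1
--         if i < j:
--             ys[i], ys[j] = ys[j], ys[i]
--             i += 1
--             j -= 1
--     return ys
-- ===== SOURCE B (Python) =====
-- def reverse_evens(xs):
--     evens = [x for x in xs if x % 2 == 0]
--     it = iter(reversed(evens))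
--     return [next(it) if x % 2 == 0 else x for x in xs]
-- ===== Notes on version B (the rewrite author's own statement) =====
-- stated objective: simpler
-- what changed: Replaces the converging two-pointer in-place swap loop by a gather-reverse-scatter pass: collect the even elements, reverse them, and rebuild the list left-to-right feeding evens from that reversed sequence.
import Mathlib
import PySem

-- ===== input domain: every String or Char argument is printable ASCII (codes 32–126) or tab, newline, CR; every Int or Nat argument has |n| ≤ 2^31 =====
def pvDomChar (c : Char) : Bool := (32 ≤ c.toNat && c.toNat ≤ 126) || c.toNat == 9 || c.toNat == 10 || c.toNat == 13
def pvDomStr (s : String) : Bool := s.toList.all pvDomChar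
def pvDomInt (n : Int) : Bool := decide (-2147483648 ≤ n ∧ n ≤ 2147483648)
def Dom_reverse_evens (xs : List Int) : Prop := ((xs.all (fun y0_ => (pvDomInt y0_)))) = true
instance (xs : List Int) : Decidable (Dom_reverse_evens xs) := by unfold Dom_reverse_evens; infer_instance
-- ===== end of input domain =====

-- B replaces A's converging two-pointer swap loop by a gather-reverse-scatter pass (same O(n) cost, simpler); A mutates only its local copy of the input, so return values are all that matters.

-- ===== PORT A =====
-- inner loop 'while i < len(ys) and ys[i] % 2: i += 1'
def advI (ys : List Int) (i : Nat) : Nat :=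
  if i < ys.length ∧ PySem.Int.mod (ys.getD i 0) 2 ≠ 0 then advI ys (i + 1) else i
termination_by ys.length - i
decreasing_by omega

-- inner loop 'while j >= 0 and ys[j] % 2: j -= 1'
def advJ (ys : List Int) (j : Int) : Int :=
  if 0 ≤ j ∧ PySem.Int.mod (ys.getD j.toNat 0) 2 ≠ 0 then advJ ys (j - 1) else j
termination_by (j + 1).toNat
decreasing_by omega

-- bounds used by the outer loop's termination argument
theorem advI_ge (ys : List Int) (i : Nat) : i ≤ advI ys i := by
  rw [advI]
  by_cases hc : i < ys.length ∧ PySem.Int.mod (ys.getD i 0) 2 ≠ 0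
  · rw [if_pos hc]
    have hlen := hc.1
    have := advI_ge ys (i + 1)
    omega
  · rw [if_neg hc]
termination_by ys.length - i
decreasing_by omega

theorem advJ_le (ys : List Int) (j : Int) : advJ ys j ≤ j := by
  rw [advJ]
  by_cases hc : 0 ≤ j ∧ PySem.Int.mod (ys.getD j.toNat 0) 2 ≠ 0
  · rw [if_pos hc]
    have h0 := hc.1
    have := advJ_le ys (j - 1)
    omega
  · rw [if_neg hc]
termination_by (j + 1).toNat
decreasing_by omega

-- outer loop 'while i < j: …'
def loopA (ys : List Int) (i : Nat) (j : Int) : List Int :=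
  if (i : Int) < j then
    if ((advI ys i : Nat) : Int) < advJ ys j then
      loopA ((ys.set (advI ys i) (ys.getD (advJ ys j).toNat 0)).set (advJ ys j).toNat (ys.getD (advI ys i) 0))
        (advI ys i + 1) (advJ ys j - 1)
    else ys
  else ys
termination_by (j - (i : Int)).toNat
decreasing_by
  have h1 := advI_ge ys i
  have h2 := advJ_le ys j
  omega

def reverse_evens (xs : List Int) : List Int := loopA xs 0 ((xs.length : Int) - 1)

-- ===== PORT B =====
-- the comprehension '[next(it) if x % 2 == 0 else x for x in xs]' consuming the reversed evens
def scatterB : List Int → List Int → List Int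
  | [], _ => []
  | x :: rest, es =>
    if PySem.Int.mod x 2 == 0 then
      match es with
      | e :: es' => e :: scatterB rest es'
      | [] => []          -- unreachable: the iterator holds exactly one value per even slot
    else x :: scatterB rest es

def reverse_evens_alt (xs : List Int) : List Int :=
  scatterB xs ((xs.filter (fun x => PySem.Int.mod x 2 == 0)).reverse)

-- ===== PRECONDITION & SPEC =====
def Spec_reverse_evens (xs : List Int) (out : List Int) : Prop := out = reverse_evens_alt xs
instance (xs : List Int) (out : List Int) : Decidable (Spec_reverse_evens xs out) := by unfold Spec_reverse_evens; infer_instance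

-- ===== CLAIM (what is proved, stated in full; the proofs are below) =====
def Claim_equal_reverse_evens : Prop := ∀ (xs : List Int), Dom_reverse_evens xs → Spec_reverse_evens xs (reverse_evens xs)

-- ===== LEMMAS AND PROOFS =====

-- the parity test both ports use, and the evens filter of B
def evB (x : Int) : Bool := PySem.Int.mod x 2 == 0
def filtE (l : List Int) : List Int := l.filter (fun x => PySem.Int.mod x 2 == 0)

theorem evB_false_of_ne {x : Int} (h : PySem.Int.mod x 2 ≠ 0) : evB x = false := by
  unfold evB; exact beq_eq_false_iff_ne.mpr h

theorem evB_true_of_eq {x : Int} (h : PySem.Int.mod x 2 = 0) : evB x = true := by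
  unfold evB; exact beq_iff_eq.mpr h

theorem evB_not {x : Int} (hx : evB x = false) : ¬ ((PySem.Int.mod x 2 == 0) = true) := by
  rw [show (PySem.Int.mod x 2 == 0) = evB x from rfl, hx]
  simp

theorem alt_def (xs : List Int) : reverse_evens_alt xs = scatterB xs (filtE xs).reverse := rfl

theorem getD_eq (ys : List Int) (k : Nat) (h : k < ys.length) : ys.getD k 0 = ys[k] := by
  rw [List.getD_eq_getElem?_getD, List.getElem?_eq_getElem h]
  rfl

-- filtE computation rules
theorem filtE_cons_even {x : Int} (l : List Int) (hx : evB x = true) :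
    filtE (x :: l) = x :: filtE l := by
  unfold filtE
  exact List.filter_cons_of_pos hx

theorem filtE_cons_odd {x : Int} (l : List Int) (hx : evB x = false) :
    filtE (x :: l) = filtE l := by
  unfold filtE
  exact List.filter_cons_of_neg (evB_not hx)

theorem filtE_append (a b : List Int) : filtE (a ++ b) = filtE a ++ filtE b := by
  unfold filtE
  exact List.filter_append a b

theorem filtE_odd (o : List Int) (h : ∀ x ∈ o, evB x = false) : filtE o = [] := by
  induction o with
  | nil => rfl
  | cons a o ih =>
    rw [filtE_cons_odd o (h a (by simp))]
    exact ih (fun x hx => h x (by simp [hx]))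

-- scatterB computation rules
theorem scatterB_cons_even (x : Int) (r : List Int) (e : Int) (es : List Int) (hx : evB x = true) :
    scatterB (x :: r) (e :: es) = e :: scatterB r es := by
  have hx' : (PySem.Int.mod x 2 == 0) = true := hx
  conv_lhs => rw [scatterB]
  rw [if_pos hx']

theorem scatterB_cons_odd (x : Int) (r es : List Int) (hx : evB x = false) :
    scatterB (x :: r) es = x :: scatterB r es := by
  cases es with
  | nil =>
    conv_lhs => rw [scatterB]
    rw [if_neg (evB_not hx)]
  | cons e es =>
    conv_lhs => rw [scatterB]
    rw [if_neg (evB_not hx)]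

theorem scatter_odd_prefix (o rest es : List Int) (h : ∀ x ∈ o, evB x = false) :
    scatterB (o ++ rest) es = o ++ scatterB rest es := by
  induction o with
  | nil => rfl
  | cons a o ih =>
    rw [List.cons_append, scatterB_cons_odd a _ es (h a (by simp))]
    rw [ih (fun x hx => h x (by simp [hx]))]
    rfl

theorem scatter_all_odd (o es : List Int) (h : ∀ x ∈ o, evB x = false) :
    scatterB o es = o := by
  have h1 := scatter_odd_prefix o [] es h
  rw [show scatterB [] es = [] from rfl, List.append_nil] at h1
  exact h1

theorem scatter_trailing (mid : List Int) (es : List Int) (o2 : List Int) (e2 a : Int)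
    (hlen : (filtE mid).length = es.length)
    (he2 : evB e2 = true) (ho2 : ∀ x ∈ o2, evB x = false) :
    scatterB (mid ++ (e2 :: o2)) (es ++ [a]) = scatterB mid es ++ (a :: o2) := by
  induction mid generalizing es with
  | nil =>
    have hes : es = [] := by
      have : filtE ([] : List Int) = [] := rfl
      rw [this] at hlen
      exact List.length_eq_zero_iff.mp hlen.symm
    subst hes
    rw [List.nil_append, List.nil_append, scatterB_cons_even e2 o2 a [] he2,
      scatter_all_odd o2 [] ho2]
    rfl
  | cons x mid ih =>
    by_cases hx : evB x = true
    · rw [filtE_cons_even mid hx] at hlen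
      obtain ⟨b, es', rfl⟩ : ∃ b es', es = b :: es' := by
        rcases es with _ | ⟨b, es'⟩
        · simp at hlen
        · exact ⟨b, es', rfl⟩
      rw [List.cons_append, List.cons_append, scatterB_cons_even x _ b _ hx,
        scatterB_cons_even x _ b _ hx]
      rw [List.length_cons, List.length_cons] at hlen
      rw [ih es' (by omega)]
      rfl
    · have hx' : evB x = false := by cases h : evB x <;> simp_all
      rw [filtE_cons_odd mid hx'] at hlen
      rw [List.cons_append, scatterB_cons_odd x _ _ hx', scatterB_cons_odd x _ _ hx']
      rw [ih es hlen]
      rfl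

-- B's function on all-odd, one-even, and two-ends-even segments
theorem fB_all_odd (o : List Int) (h : ∀ x ∈ o, evB x = false) :
    reverse_evens_alt o = o := by
  rw [alt_def, filtE_odd o h]
  exact scatter_all_odd o _ h

theorem fB_single (x : Int) : reverse_evens_alt [x] = [x] := by
  rw [alt_def]
  by_cases hx : evB x = true
  · rw [show filtE [x] = [x] from filtE_cons_even [] hx]
    rw [List.reverse_singleton, scatterB_cons_even x [] x [] hx]
    rfl
  · have hx' : evB x = false := by cases h : evB x <;> simp_all
    rw [show filtE [x] = filtE [] from filtE_cons_odd [] hx']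
    rw [show filtE ([] : List Int) = [] from rfl, List.reverse_nil,
      scatterB_cons_odd x [] [] hx']
    rfl

theorem fB_one (o1 o2 : List Int) (e : Int) (ho1 : ∀ x ∈ o1, evB x = false)
    (ho2 : ∀ x ∈ o2, evB x = false) (he : evB e = true) :
    reverse_evens_alt (o1 ++ (e :: o2)) = o1 ++ (e :: o2) := by
  rw [alt_def, filtE_append, filtE_odd o1 ho1, filtE_cons_even o2 he, filtE_odd o2 ho2]
  rw [List.nil_append, List.reverse_singleton]
  rw [scatter_odd_prefix o1 _ _ ho1, scatterB_cons_even e o2 e [] he,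
    scatter_all_odd o2 [] ho2]

theorem fB_swap (o1 o2 mid : List Int) (e1 e2 : Int)
    (ho1 : ∀ x ∈ o1, evB x = false) (ho2 : ∀ x ∈ o2, evB x = false)
    (he1 : evB e1 = true) (he2 : evB e2 = true) :
    reverse_evens_alt (o1 ++ (e1 :: (mid ++ (e2 :: o2)))) =
      o1 ++ (e2 :: (reverse_evens_alt mid ++ (e1 :: o2))) := by
  rw [alt_def]
  have hf : filtE (o1 ++ (e1 :: (mid ++ (e2 :: o2)))) = e1 :: (filtE mid ++ [e2]) := by
    rw [filtE_append, filtE_odd o1 ho1, filtE_cons_even _ he1, filtE_append,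
      filtE_cons_even _ he2, filtE_odd o2 ho2]
    simp
  rw [hf]
  have hrev : (e1 :: (filtE mid ++ [e2])).reverse = e2 :: ((filtE mid).reverse ++ [e1]) := by
    simp
  rw [hrev]
  rw [scatter_odd_prefix o1 _ _ ho1]
  rw [scatterB_cons_even e1 _ e2 _ he1]
  rw [scatter_trailing mid ((filtE mid).reverse) o2 e2 e1 (by simp) he2 ho2]
  rw [← alt_def]

-- what the inner loops guarantee about the scanned positions
theorem advI_odd (ys : List Int) (i : Nat) :
    ∀ k : Nat, i ≤ k → k < advI ys i → evB (ys.getD k 0) = false := by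
  intro k hik hk
  rw [advI] at hk
  by_cases hc : i < ys.length ∧ PySem.Int.mod (ys.getD i 0) 2 ≠ 0
  · rw [if_pos hc] at hk
    have hlen := hc.1
    by_cases hki : k = i
    · subst hki; exact evB_false_of_ne hc.2
    · exact advI_odd ys (i + 1) k (by omega) hk
  · rw [if_neg hc] at hk; omega
termination_by ys.length - i
decreasing_by omega

theorem advI_stop (ys : List Int) (i : Nat) (h : advI ys i < ys.length) :
    evB (ys.getD (advI ys i) 0) = true := by
  rw [advI] at h ⊢
  by_cases hc : i < ys.length ∧ PySem.Int.mod (ys.getD i 0) 2 ≠ 0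
  · rw [if_pos hc] at h ⊢
    have hlen := hc.1
    exact advI_stop ys (i + 1) h
  · rw [if_neg hc] at h ⊢
    refine evB_true_of_eq ?_
    by_contra hne
    exact hc ⟨h, hne⟩
termination_by ys.length - i
decreasing_by omega

theorem advJ_odd (ys : List Int) (j : Int) :
    ∀ k : Int, advJ ys j < k → k ≤ j → evB (ys.getD k.toNat 0) = false := by
  intro k hk hkj
  rw [advJ] at hk
  by_cases hc : 0 ≤ j ∧ PySem.Int.mod (ys.getD j.toNat 0) 2 ≠ 0
  · rw [if_pos hc] at hk
    have h0 := hc.1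
    by_cases hkj' : k = j
    · subst hkj'; exact evB_false_of_ne hc.2
    · exact advJ_odd ys (j - 1) k hk (by omega)
  · rw [if_neg hc] at hk; omega
termination_by (j + 1).toNat
decreasing_by omega

theorem advJ_stop (ys : List Int) (j : Int) (h : 0 ≤ advJ ys j) :
    evB (ys.getD (advJ ys j).toNat 0) = true := by
  rw [advJ] at h ⊢
  by_cases hc : 0 ≤ j ∧ PySem.Int.mod (ys.getD j.toNat 0) 2 ≠ 0
  · rw [if_pos hc] at h ⊢
    have h0 := hc.1
    exact advJ_stop ys (j - 1) h
  · rw [if_neg hc] at h ⊢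
    refine evB_true_of_eq ?_
    by_contra hne
    exact hc ⟨h, hne⟩
termination_by (j + 1).toNat
decreasing_by omega

-- slices: membership by index, splitting at an interior position
theorem slice_mem (ys : List Int) (i m : Nat) (x : Int) (hx : x ∈ (ys.drop i).take m) :
    ∃ k : Nat, i ≤ k ∧ k < i + m ∧ k < ys.length ∧ x = ys.getD k 0 := by
  obtain ⟨n, hn, rfl⟩ := List.mem_iff_getElem.mp hx
  have hlen : n < m ∧ n < ys.length - i := by
    have h1 := hn
    simp only [List.length_take, List.length_drop] at h1
    omega
  refine ⟨i + n, by omega, by omega, by omega, ?_⟩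
  rw [List.getElem_take, List.getElem_drop]
  rw [getD_eq ys (i + n) (by omega)]

theorem slice_odd (ys : List Int) (i m : Nat)
    (h : ∀ k : Nat, i ≤ k → k < i + m → k < ys.length → evB (ys.getD k 0) = false) :
    ∀ x ∈ (ys.drop i).take m, evB x = false := by
  intro x hx
  obtain ⟨k, hk1, hk2, hk3, rfl⟩ := slice_mem ys i m x hx
  exact h k hk1 hk2 hk3

theorem slice_split' (ys : List Int) (i p n : Nat) (hip : i ≤ p) (hpn : p < n)
    (hn : n ≤ ys.length) :
    (ys.drop i).take (n - i) =
      (ys.drop i).take (p - i) ++ ys.getD p 0 :: (ys.drop (p + 1)).take (n - (p + 1)) := by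
  have hp : p < ys.length := by omega
  rw [show n - i = (p - i) + ((n - (p + 1)) + 1) from by omega, List.take_add]
  congr 1
  rw [List.drop_drop, show i + (p - i) = p from by omega]
  rw [List.drop_eq_getElem_cons hp, List.take_succ_cons, getD_eq ys p hp]

-- the three-way split of a list at i ≤ n
theorem split3 (ys : List Int) (i n : Nat) (hin : i ≤ n) :
    ys.take i ++ (ys.drop i).take (n - i) ++ ys.drop n = ys := by
  have h1 : ys.take i ++ (ys.drop i).take (n - i) = ys.take n := by
    rw [show n = i + (n - i) from by omega, List.take_add, Nat.add_sub_cancel_left]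
  rw [h1, List.take_append_drop]

-- writing at the length of a prefix
theorem set_at_length (T rs : List Int) (v : Int) : (T ++ rs).set T.length v = T ++ rs.set 0 v := by
  induction T with
  | nil => simp
  | cons t T ih => simp [ih]

-- decompose ys around two positions p < q
theorem decomp (ys : List Int) (p q : Nat) (hpq : p < q) (hq : q < ys.length) :
    ys = ys.take p ++
      ys.getD p 0 :: ((ys.drop (p + 1)).take (q - (p + 1)) ++ ys.getD q 0 :: ys.drop (q + 1)) := by
  have hp : p < ys.length := by omega
  have hs : ys.drop p =
      ys.getD p 0 :: ((ys.drop (p + 1)).take (q - (p + 1)) ++ ys.getD q 0 :: ys.drop (q + 1)) := by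
    rw [List.drop_eq_getElem_cons hp, getD_eq ys p hp]
    congr 1
    conv_lhs => rw [← List.take_append_drop (q - (p + 1)) (ys.drop (p + 1))]
    congr 1
    rw [List.drop_drop, show p + 1 + (q - (p + 1)) = q from by omega]
    rw [List.drop_eq_getElem_cons hq, getD_eq ys q hq]
  conv_lhs => rw [← List.take_append_drop p ys, hs]

-- the swap the outer loop performs, on the decomposed list
theorem set_swap (T M D : List Int) (a b : Int) (p q : Nat)
    (hp : T.length = p) (hq : p + 1 + M.length = q) :
    ((T ++ (a :: (M ++ (b :: D)))).set p b).set q a = T ++ (b :: (M ++ (a :: D))) := by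
  subst hp
  rw [set_at_length T _ b, List.set_cons_zero]
  rw [show T ++ (b :: (M ++ (b :: D))) = (T ++ (b :: M)) ++ (b :: D) from by simp]
  rw [show q = (T ++ (b :: M)).length from by
    simp only [List.length_append, List.length_cons]; omega]
  rw [set_at_length _ _ a, List.set_cons_zero]
  simp

-- the outer loop computes B's gather-reverse-scatter on the active segment [i, j]
theorem loopA_eq (ys : List Int) (i : Nat) (j : Int)
    (h1 : (i : Int) ≤ j + 1) (h2 : j < (ys.length : Int)) :
    loopA ys i j =
      ys.take i ++ reverse_evens_alt ((ys.drop i).take ((j + 1).toNat - i)) ++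
        ys.drop (j + 1).toNat := by
  rw [loopA]
  by_cases hij : (i : Int) < j
  · rw [if_pos hij]
    have hj0 : 0 ≤ j := by omega
    have hgei : i ≤ advI ys i := advI_ge ys i
    have hlej : advJ ys j ≤ j := advJ_le ys j
    set i' := advI ys i with hidef
    set q' := advJ ys j with hqdef
    by_cases hswap : ((i' : Nat) : Int) < q'
    · rw [if_pos hswap]
      have hq0 : (0 : Int) ≤ q' := by omega
      have hiq : i' < q'.toNat := by omega
      have hqlen : q'.toNat < ys.length := by omega
      have hilen : i' < ys.length := by omega
      have heva : evB (ys.getD i' 0) = true := advI_stop ys i hilen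
      have hevb : evB (ys.getD q'.toNat 0) = true := advJ_stop ys j hq0
      -- name the five blocks of ys
      have hTlen : (ys.take i').length = i' := by rw [List.length_take]; omega
      have hMlen : ((ys.drop (i' + 1)).take (q'.toNat - (i' + 1))).length
          = q'.toNat - (i' + 1) := by
        rw [List.length_take, List.length_drop]; omega
      have hysdec := decomp ys i' q'.toNat hiq hqlen
      have hset : (ys.set i' (ys.getD q'.toNat 0)).set q'.toNat (ys.getD i' 0) =
          ys.take i' ++ (ys.getD q'.toNat 0 ::
            ((ys.drop (i' + 1)).take (q'.toNat - (i' + 1)) ++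
              (ys.getD i' 0 :: ys.drop (q'.toNat + 1)))) := by
        have h := set_swap (ys.take i') ((ys.drop (i' + 1)).take (q'.toNat - (i' + 1)))
          (ys.drop (q'.toNat + 1)) (ys.getD i' 0) (ys.getD q'.toNat 0) i' q'.toNat
          hTlen (by rw [hMlen]; omega)
        rw [← hysdec] at h
        exact h
      have IH := loopA_eq ((ys.set i' (ys.getD q'.toNat 0)).set q'.toNat (ys.getD i' 0))
        (i' + 1) (q' - 1) (by omega) (by simp only [List.length_set]; omega)
      rw [IH, hset]
      have hc3 : ((q' - 1) + 1).toNat = q'.toNat := by omega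
      rw [hc3]
      have ctake : (ys.take i' ++ (ys.getD q'.toNat 0 ::
          ((ys.drop (i' + 1)).take (q'.toNat - (i' + 1)) ++
            (ys.getD i' 0 :: ys.drop (q'.toNat + 1))))).take (i' + 1)
          = ys.take i' ++ [ys.getD q'.toNat 0] := by
        rw [show ys.take i' ++ (ys.getD q'.toNat 0 ::
            ((ys.drop (i' + 1)).take (q'.toNat - (i' + 1)) ++
              (ys.getD i' 0 :: ys.drop (q'.toNat + 1))))
            = (ys.take i' ++ [ys.getD q'.toNat 0]) ++
              ((ys.drop (i' + 1)).take (q'.toNat - (i' + 1)) ++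
                (ys.getD i' 0 :: ys.drop (q'.toNat + 1))) from by simp]
        exact List.take_left' (by simp [hTlen])
      have cdrop2 : (ys.take i' ++ (ys.getD q'.toNat 0 ::
          ((ys.drop (i' + 1)).take (q'.toNat - (i' + 1)) ++
            (ys.getD i' 0 :: ys.drop (q'.toNat + 1))))).drop (i' + 1)
          = (ys.drop (i' + 1)).take (q'.toNat - (i' + 1)) ++
            (ys.getD i' 0 :: ys.drop (q'.toNat + 1)) := by
        rw [show ys.take i' ++ (ys.getD q'.toNat 0 ::
            ((ys.drop (i' + 1)).take (q'.toNat - (i' + 1)) ++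
              (ys.getD i' 0 :: ys.drop (q'.toNat + 1))))
            = (ys.take i' ++ [ys.getD q'.toNat 0]) ++
              ((ys.drop (i' + 1)).take (q'.toNat - (i' + 1)) ++
                (ys.getD i' 0 :: ys.drop (q'.toNat + 1))) from by simp]
        exact List.drop_left' (by simp [hTlen])
      have ctakeM : ((ys.drop (i' + 1)).take (q'.toNat - (i' + 1)) ++
          (ys.getD i' 0 :: ys.drop (q'.toNat + 1))).take (q'.toNat - (i' + 1))
          = (ys.drop (i' + 1)).take (q'.toNat - (i' + 1)) :=
        List.take_left' hMlen
      have cdrop : (ys.take i' ++ (ys.getD q'.toNat 0 ::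
          ((ys.drop (i' + 1)).take (q'.toNat - (i' + 1)) ++
            (ys.getD i' 0 :: ys.drop (q'.toNat + 1))))).drop q'.toNat
          = ys.getD i' 0 :: ys.drop (q'.toNat + 1) := by
        rw [show ys.take i' ++ (ys.getD q'.toNat 0 ::
            ((ys.drop (i' + 1)).take (q'.toNat - (i' + 1)) ++
              (ys.getD i' 0 :: ys.drop (q'.toNat + 1))))
            = (ys.take i' ++ (ys.getD q'.toNat 0 ::
                (ys.drop (i' + 1)).take (q'.toNat - (i' + 1)))) ++
              (ys.getD i' 0 :: ys.drop (q'.toNat + 1)) from by simp]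
        exact List.drop_left' (by simp [hTlen, hMlen]; omega)
      rw [ctake, cdrop2, ctakeM, cdrop]
      -- now rewrite the goal's right-hand side
      have hseg : (ys.drop i).take ((j + 1).toNat - i) =
          (ys.drop i).take (i' - i) ++ (ys.getD i' 0 ::
            ((ys.drop (i' + 1)).take (q'.toNat - (i' + 1)) ++
              (ys.getD q'.toNat 0 :: (ys.drop (q'.toNat + 1)).take ((j + 1).toNat - (q'.toNat + 1))))) := by
        rw [slice_split' ys i i' (j + 1).toNat hgei (by omega) (by omega)]
        rw [slice_split' ys (i' + 1) q'.toNat (j + 1).toNat (by omega) (by omega) (by omega)]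
      rw [hseg]
      have halt := fB_swap ((ys.drop i).take (i' - i))
        ((ys.drop (q'.toNat + 1)).take ((j + 1).toNat - (q'.toNat + 1)))
        ((ys.drop (i' + 1)).take (q'.toNat - (i' + 1)))
        (ys.getD i' 0) (ys.getD q'.toNat 0)
        (slice_odd ys i (i' - i) (fun k hk1 hk2 _ => advI_odd ys i k hk1 (by omega)))
        (slice_odd ys (q'.toNat + 1) ((j + 1).toNat - (q'.toNat + 1)) (fun k hk1 hk2 _ => by
          have h := advJ_odd ys j (k : Int) (by omega) (by omega)
          simpa using h))
        heva hevb
      rw [halt]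
      have hTo1 : ys.take i' = ys.take i ++ (ys.drop i).take (i' - i) := by
        rw [show i' = i + (i' - i) from by omega, List.take_add, Nat.add_sub_cancel_left]
      have hDo2 : ys.drop (q'.toNat + 1) =
          (ys.drop (q'.toNat + 1)).take ((j + 1).toNat - (q'.toNat + 1)) ++
            ys.drop (j + 1).toNat := by
        conv_lhs => rw [← List.take_append_drop ((j + 1).toNat - (q'.toNat + 1)) (ys.drop (q'.toNat + 1))]
        congr 1
        rw [List.drop_drop, show q'.toNat + 1 + ((j + 1).toNat - (q'.toNat + 1)) = (j + 1).toNat from by omega]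
      rw [hTo1]
      conv_lhs => rw [hDo2]
      simp
    · rw [if_neg hswap]
      have hin : i ≤ (j + 1).toNat := by omega
      have hjlen : (j + 1).toNat ≤ ys.length := by omega
      have hflip : reverse_evens_alt ((ys.drop i).take ((j + 1).toNat - i)) =
          (ys.drop i).take ((j + 1).toNat - i) := by
        by_cases hcase : (j + 1).toNat ≤ i'
        · exact fB_all_odd _ (slice_odd ys i ((j + 1).toNat - i)
            (fun k hk1 hk2 _ => advI_odd ys i k hk1 (by omega)))
        · have hilen : i' < ys.length := by omega
          have heva : evB (ys.getD i' 0) = true := advI_stop ys i hilen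
          have hq'i : q' = (i' : Int) := by
            by_contra hne
            have hlt : q' < (i' : Int) := by omega
            have hodd := advJ_odd ys j (i' : Int) (by omega) (by omega)
            simp only [Int.toNat_natCast] at hodd
            rw [hodd] at heva
            exact absurd heva (by simp)
          rw [slice_split' ys i i' (j + 1).toNat hgei (by omega) (by omega)]
          refine fB_one _ _ _ (slice_odd ys i (i' - i)
            (fun k hk1 hk2 _ => advI_odd ys i k hk1 (by omega))) ?_ heva
          refine slice_odd ys (i' + 1) ((j + 1).toNat - (i' + 1)) (fun k hk1 hk2 _ => ?_)
          have h := advJ_odd ys j (k : Int) (by omega) (by omega)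
          simpa using h
      rw [hflip, split3 ys i (j + 1).toNat hin]
  · rw [if_neg hij]
    by_cases hji : j = (i : Int)
    · have hilen : i < ys.length := by omega
      have hjn : (j + 1).toNat = i + 1 := by omega
      rw [hjn]
      have hseg : (ys.drop i).take (i + 1 - i) = [ys.getD i 0] := by
        rw [show i + 1 - i = 1 from by omega, List.drop_eq_getElem_cons hilen,
          List.take_succ_cons, List.take_zero, getD_eq ys i hilen]
      rw [hseg, fB_single, getD_eq ys i hilen]
      conv_lhs => rw [← List.take_append_drop i ys, List.drop_eq_getElem_cons hilen]
      simp
    · have hjn : (j + 1).toNat = i := by omega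
      rw [hjn]
      rw [show i - i = 0 from by omega, List.take_zero]
      rw [show reverse_evens_alt [] = [] from rfl]
      rw [List.append_nil, List.take_append_drop]
termination_by (j - (i : Int)).toNat
decreasing_by omega

-- ===== VERDICT (by name: the statement is the Claim_ definition above) =====
theorem reverse_evens_spec : Claim_equal_reverse_evens := by
  intro xs _
  unfold Spec_reverse_evens reverse_evens
  rw [loopA_eq xs 0 ((xs.length : Int) - 1) (by omega) (by omega)]
  simp
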